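-- pv_equiv track=rewrite | github.com/mosesoghene/javaClass | phaseGateOne/java/studentgrades.py | calculateStudentPositions
-- ===== SOURCE A (Python) =====
-- def calculateStudentPositions(totals):
--     positions = [];
--     for i in range(len(totals)):
--       position = 1;
--       for j in range(len(totals)):
--         if (totals[j] > totals[i]):
--           position += 1;
--
--       positions.append(position);
--
--     return positions;
-- ===== SOURCE B (Python) =====
-- def calculateStudentPositions(totals):
--     rank = {}
--     for i, v in enumerate(sorted(totals, reverse=True)):
--         if v not in rank:
--             rank[v] = i + 1
--     return [rank[v] for v in totals]
-- ===== Notes on version B (the rewrite author's own statement) =====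
-- stated objective: faster
-- what changed: Replaces the quadratic per-element scan counting strictly greater totals with one descending sort plus a first-occurrence-index rank dictionary, then a single lookup pass.
import Mathlib
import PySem

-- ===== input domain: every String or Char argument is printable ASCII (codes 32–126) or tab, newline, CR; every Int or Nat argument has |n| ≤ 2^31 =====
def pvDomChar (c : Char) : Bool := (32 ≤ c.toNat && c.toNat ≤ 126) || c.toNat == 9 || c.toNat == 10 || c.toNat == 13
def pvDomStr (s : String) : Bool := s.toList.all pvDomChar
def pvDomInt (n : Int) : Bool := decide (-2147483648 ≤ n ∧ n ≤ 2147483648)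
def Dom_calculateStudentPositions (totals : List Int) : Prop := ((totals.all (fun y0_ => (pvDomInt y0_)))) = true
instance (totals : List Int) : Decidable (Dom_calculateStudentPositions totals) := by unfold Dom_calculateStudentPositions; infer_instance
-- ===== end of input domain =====

-- B replaces A's count-of-greater double loop by one descending sort plus a
-- first-occurrence-index rank dictionary (objective: faster).

-- ===== PORT A =====
def calculateStudentPositions (totals : List Int) : List Int :=
  (PySem.List.pyRange 0 (totals.length : Int) 1).foldl (fun positions i =>
    let position :=
      (PySem.List.pyRange 0 (totals.length : Int) 1).foldl (fun pos j =>
        if PySem.List.pyGetD totals i 0 < PySem.List.pyGetD totals j 0 then pos + 1 else pos)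
        (1 : Int)
    positions ++ [position]) []

-- ===== PORT B =====
-- one step of Source B's rank-building loop: 'if v not in rank: rank[v] = i + 1'
def rankStep (d : PySem.Dict Int Int) (p : Int × Int) : PySem.Dict Int Int :=
  if d.contains p.2 then d else d.insert p.2 (p.1 + 1)

def calculateStudentPositions_alt (totals : List Int) : List Int :=
  let rank : PySem.Dict Int Int :=
    (PySem.List.enumerate (PySem.List.sorted totals (fun x => x) true) 0).foldl
      rankStep PySem.Dict.empty
  totals.map (fun v => rank.getD v 0)

-- ===== PRECONDITION & SPEC =====
def Spec_calculateStudentPositions (totals : List Int) (out : List Int) : Prop := out = calculateStudentPositions_alt totals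
instance (totals : List Int) (out : List Int) : Decidable (Spec_calculateStudentPositions totals out) := by unfold Spec_calculateStudentPositions; infer_instance

-- ===== CLAIM (what is proved, stated in full; the proofs are below) =====
def Claim_equal_calculateStudentPositions : Prop := ∀ (totals : List Int), Dom_calculateStudentPositions totals → Spec_calculateStudentPositions totals (calculateStudentPositions totals)

-- ===== LEMMAS AND PROOFS =====

theorem rankStep_pos (d : PySem.Dict Int Int) (p : Int × Int) (h : d.contains p.2 = true) :
    rankStep d p = d := by simp [rankStep, h]

theorem rankStep_neg (d : PySem.Dict Int Int) (p : Int × Int) (h : ¬ d.contains p.2 = true) :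
    rankStep d p = d.insert p.2 (p.1 + 1) := by simp [rankStep, h]

-- A computes, for each value v of the list, 1 + (number of strictly greater elements).
theorem calcA_eq_map (totals : List Int) :
    calculateStudentPositions totals
      = totals.map (fun v => 1 + (totals.countP (fun y => decide (v < y)) : Int)) := by
  unfold calculateStudentPositions
  rw [PySem.List.foldl_append_singleton_eq_map]
  simp only [PySem.List.foldl_ite_add_one]
  have hmap := PySem.List.map_pyGetD_pyRange_zero' totals (0 : Int)
  have hcount : ∀ v : Int,
      (PySem.List.pyRange 0 (totals.length : Int) 1).countP
          (fun j => decide (v < PySem.List.pyGetD totals j 0))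
        = totals.countP (fun y => decide (v < y)) := by
    intro v
    conv_rhs => rw [← hmap]
    rw [List.countP_map]
    rfl
  have hstep : (PySem.List.pyRange 0 (totals.length : Int) 1).map
        (fun i => 1 + ((PySem.List.pyRange 0 (totals.length : Int) 1).countP
            (fun j => decide (PySem.List.pyGetD totals i 0 < PySem.List.pyGetD totals j 0)) : Int))
      = (PySem.List.pyRange 0 (totals.length : Int) 1).map
        ((fun v => 1 + (totals.countP (fun y => decide (v < y)) : Int)) ∘
          (fun i => PySem.List.pyGetD totals i 0)) := by
    apply List.map_congr_left
    intro i _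
    simp only [Function.comp]
    rw [hcount]
  rw [hstep, ← List.map_map, hmap, List.nil_append]

-- Once a key is present, the rank-building loop never changes its value.
theorem rankLoop_preserve (l : List (Int × Int)) (d : PySem.Dict Int Int) (v : Int)
    (hc : d.contains v = true) :
    ((l.foldl rankStep d).getD v 0 = d.getD v 0)
    ∧ (l.foldl rankStep d).contains v = true := by
  induction l generalizing d with
  | nil => exact ⟨rfl, hc⟩
  | cons p t ih =>
    simp only [List.foldl_cons]
    by_cases h : d.contains p.2 = true
    · rw [rankStep_pos d p h]; exact ih d hc
    · have hne : v ≠ p.2 := by intro he; rw [he] at hc; exact h hc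
      rw [rankStep_neg d p h]
      have hc' : (d.insert p.2 (p.1 + 1)).contains v = true := by
        rw [PySem.Dict.contains_insert, hc]; simp
      obtain ⟨h1, h2⟩ := ih (d.insert p.2 (p.1 + 1)) hc'
      refine ⟨?_, h2⟩
      rw [h1, PySem.Dict.getD_insert]
      simp [hne]

-- On a descending-sorted list, the rank loop maps v to start-index + (count of greater) + 1.
theorem rankLoop_getD (s : List Int) (hp : s.Pairwise (fun a b => b ≤ a)) :
    ∀ (i : Int) (d : PySem.Dict Int Int) (v : Int), v ∈ s → d.contains v = false →
    ((PySem.List.enumerate s i).foldl rankStep d).getD v 0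
      = i + (s.countP (fun y => decide (v < y)) : Int) + 1 := by
  induction s with
  | nil => intro _ _ _ hv; cases hv
  | cons a t ih =>
    intro i d v hv hc
    rw [PySem.List.enumerate_cons, List.foldl_cons]
    rw [List.pairwise_cons] at hp
    obtain ⟨hle, hpt⟩ := hp
    by_cases hav : a = v
    · subst hav
      rw [rankStep_neg d (i, a) (by simp [hc])]
      have hc' : (d.insert a (i + 1)).contains a = true := PySem.Dict.contains_insert_self d a _
      rw [(rankLoop_preserve (PySem.List.enumerate t (i + 1)) _ a hc').1,
          PySem.Dict.getD_insert_self]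
      have hcount : (a :: t).countP (fun y => decide (a < y)) = 0 := by
        rw [List.countP_eq_zero]
        intro y hy
        rcases List.mem_cons.mp hy with h | h
        · simp [h]
        · have := hle y h; simp; omega
      rw [hcount]; simp
    · have hvt : v ∈ t := (List.mem_cons.mp hv).resolve_left (fun h => hav h.symm)
      have hva : v < a := lt_of_le_of_ne (hle v hvt) (fun h => hav h.symm)
      have hcnt : ((a :: t).countP (fun y => decide (v < y)) : Int)
           = (t.countP (fun y => decide (v < y)) : Int) + 1 := by
        rw [List.countP_cons]; simp [hva]
      by_cases hca : d.contains a = true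
      · rw [rankStep_pos d (i, a) hca, ih hpt (i + 1) d v hvt hc, hcnt]; ring
      · rw [rankStep_neg d (i, a) hca]
        have hc' : (d.insert a (i + 1)).contains v = false := by
          rw [PySem.Dict.contains_insert, hc]
          simp only [Bool.or_false, beq_eq_false_iff_ne, ne_eq]
          exact fun h => hav h.symm
        rw [ih hpt (i + 1) _ v hvt hc', hcnt]; ring

theorem calcB_eq_map (totals : List Int) :
    calculateStudentPositions_alt totals
      = totals.map (fun v => 1 + (totals.countP (fun y => decide (v < y)) : Int)) := by
  unfold calculateStudentPositions_alt
  apply List.map_congr_left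
  intro v hv
  have hperm : (PySem.List.sorted totals (fun x => x) true).Perm totals :=
    PySem.List.sorted_perm totals (fun x => x) true
  have hp : (PySem.List.sorted totals (fun x => x) true).Pairwise (fun a b => b ≤ a) :=
    PySem.List.sorted_pairwise_rev totals (fun x => x)
  have hvs : v ∈ PySem.List.sorted totals (fun x => x) true := hperm.mem_iff.mpr hv
  rw [rankLoop_getD _ hp 0 PySem.Dict.empty v hvs (PySem.Dict.contains_empty v),
      hperm.countP_eq]
  ring

-- ===== VERDICT (by name: the statement is the Claim_ definition above) =====
theorem calculateStudentPositions_spec : Claim_equal_calculateStudentPositions := by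
  intro totals _
  unfold Spec_calculateStudentPositions
  rw [calcA_eq_map, calcB_eq_map]
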